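-- pv_equiv track=rewrite | github.com/dennisliuu/Coding-365 | 103/14.py | thinkb
-- ===== SOURCE A (Python) =====
-- def thinkb(ans,i,bb):
--     ans = str(ans)
--     bb = 0
--     for j in range(4):
--         for k in range(4):
--             if j != k:
--                 if ans[j] == i[k]:
--                     bb+=1
--     return bb
-- ===== SOURCE B (Python) =====
-- def thinkb(ans, i, bb):
--     s = str(ans)
--     freq = {}
--     for k in range(4):
--         freq[i[k]] = freq.get(i[k], 0) + 1
--     total = sum(freq.get(s[j], 0) for j in range(4))
--     diag = sum(1 for j in range(4) if s[j] == i[j])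
--     return total - diag
-- ===== Notes on version B (the rewrite author's own statement) =====
-- stated objective: alternative
-- what changed: Replaces A's nested 4x4 position-pair scan with a frequency dictionary of i's first four characters: total ordered matches (sum of counter lookups over ans's first four characters) minus the same-position matches.
import Mathlib
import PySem

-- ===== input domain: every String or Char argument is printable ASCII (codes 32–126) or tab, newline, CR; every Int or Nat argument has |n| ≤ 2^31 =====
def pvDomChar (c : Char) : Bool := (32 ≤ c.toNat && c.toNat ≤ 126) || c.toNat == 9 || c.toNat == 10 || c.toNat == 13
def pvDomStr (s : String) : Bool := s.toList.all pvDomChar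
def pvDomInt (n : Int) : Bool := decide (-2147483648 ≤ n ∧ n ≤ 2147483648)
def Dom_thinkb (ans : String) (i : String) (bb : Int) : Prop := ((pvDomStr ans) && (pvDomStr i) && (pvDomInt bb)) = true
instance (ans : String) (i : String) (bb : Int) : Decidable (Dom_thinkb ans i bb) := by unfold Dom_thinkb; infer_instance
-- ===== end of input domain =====

-- B replaces A's nested 4×4 index scan by a frequency table of i's first four characters
-- (total ordered matches minus same-position matches) — alternative decomposition, not faster.

-- ===== PORT A =====
-- literal port of A: bb is reassigned to 0, then nested loops over range(4)×range(4);
-- ans[j] / i[k] are PySem.List.pyGetD (total form; the IndexError inputs are excluded by Pre_).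
def thinkb (ans : String) (i : String) (bb : Int) : Int :=
  let a := ans.toList
  let t := i.toList
  let bb0 : Int := 0
  (PySem.List.pyRange 0 4 1).foldl (fun acc j =>
    (PySem.List.pyRange 0 4 1).foldl (fun acc k =>
      if j ≠ k then
        if PySem.List.pyGetD a j ' ' = PySem.List.pyGetD t k ' ' then acc + 1 else acc
      else acc) acc) bb0

-- ===== PORT B =====
-- literal port of Source B: build a frequency dict of i[0..3], sum its lookups at s[0..3],
-- subtract the count of same-position matches.
def thinkb_alt (ans : String) (i : String) (bb : Int) : Int :=
  let s := ans.toList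
  let t := i.toList
  let freq : PySem.Dict Char Int :=
    (PySem.List.pyRange 0 4 1).foldl (fun d k =>
      d.insert (PySem.List.pyGetD t k ' ') (d.getD (PySem.List.pyGetD t k ' ') 0 + 1)) PySem.Dict.empty
  let total : Int := ((PySem.List.pyRange 0 4 1).map (fun j => freq.getD (PySem.List.pyGetD s j ' ') 0)).sum
  let diag : Int := ((PySem.List.pyRange 0 4 1).map (fun j =>
      if PySem.List.pyGetD s j ' ' = PySem.List.pyGetD t j ' ' then (1:Int) else 0)).sum
  total - diag

-- ===== PRECONDITION & SPEC =====
-- Pre_ excludes exactly the inputs where both Pythons raise IndexError: a string shorter than 4.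
def Pre_thinkb (ans : String) (i : String) (bb : Int) : Prop :=
  4 ≤ ans.toList.length ∧ 4 ≤ i.toList.length
instance (ans : String) (i : String) (bb : Int) : Decidable (Pre_thinkb ans i bb) := by
  unfold Pre_thinkb; infer_instance

def pvWitness_thinkb : String × String × Int := ("abcd", "bcda", 0)

def Spec_thinkb (ans : String) (i : String) (bb : Int) (out : Int) : Prop := out = thinkb_alt ans i bb
instance (ans : String) (i : String) (bb : Int) (out : Int) : Decidable (Spec_thinkb ans i bb out) := by unfold Spec_thinkb; infer_instance

-- ===== CLAIM (what is proved, stated in full; the proofs are below) =====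
def Claim_equal_thinkb : Prop := ∀ (ans : String) (i : String) (bb : Int), Dom_thinkb ans i bb → Pre_thinkb ans i bb → Spec_thinkb ans i bb (thinkb ans i bb)

-- ===== LEMMAS AND PROOFS =====

-- Main computation: with both strings destructured to four leading characters, A's nested scan
-- equals B's count-based total minus the diagonal.
set_option maxHeartbeats 1000000 in
theorem main_eq (a0 a1 a2 a3 t0 t1 t2 t3 : Char) (ra rt : List Char) (bb : Int) :
    thinkb (String.ofList (a0 :: a1 :: a2 :: a3 :: ra)) (String.ofList (t0 :: t1 :: t2 :: t3 :: rt)) bb =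
    thinkb_alt (String.ofList (a0 :: a1 :: a2 :: a3 :: ra)) (String.ofList (t0 :: t1 :: t2 :: t3 :: rt)) bb := by
  have hr : PySem.List.pyRange 0 4 1 = [0,1,2,3] := by decide
  have pa0 : PySem.List.pyGetD (a0::a1::a2::a3::ra) (0:Int) ' ' = a0 := by simp [pysem]
  have pa1 : PySem.List.pyGetD (a0::a1::a2::a3::ra) (1:Int) ' ' = a1 := by simp [pysem]
  have pa2 : PySem.List.pyGetD (a0::a1::a2::a3::ra) (2:Int) ' ' = a2 := by simp [pysem]
  have pa3 : PySem.List.pyGetD (a0::a1::a2::a3::ra) (3:Int) ' ' = a3 := by simp [pysem]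
  have pt0 : PySem.List.pyGetD (t0::t1::t2::t3::rt) (0:Int) ' ' = t0 := by simp [pysem]
  have pt1 : PySem.List.pyGetD (t0::t1::t2::t3::rt) (1:Int) ' ' = t1 := by simp [pysem]
  have pt2 : PySem.List.pyGetD (t0::t1::t2::t3::rt) (2:Int) ' ' = t2 := by simp [pysem]
  have pt3 : PySem.List.pyGetD (t0::t1::t2::t3::rt) (3:Int) ' ' = t3 := by simp [pysem]
  -- additive form of A's inner loop body (so the foldl becomes a sum)
  have step : ∀ (acc j k : Int),
      (if j ≠ k then
        if PySem.List.pyGetD (a0::a1::a2::a3::ra) j ' ' = PySem.List.pyGetD (t0::t1::t2::t3::rt) k ' '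
        then acc + 1 else acc
       else acc)
      = acc + (if j ≠ k ∧ PySem.List.pyGetD (a0::a1::a2::a3::ra) j ' ' = PySem.List.pyGetD (t0::t1::t2::t3::rt) k ' ' then 1 else 0) := by
    intro acc j k
    by_cases h1 : j = k <;> by_cases h2 : PySem.List.pyGetD (a0::a1::a2::a3::ra) j ' ' = PySem.List.pyGetD (t0::t1::t2::t3::rt) k ' ' <;>
      simp [h1, h2]
  -- B's frequency dict is the count-loop over the first four characters of i
  have hdict : (List.foldl (fun (d : PySem.Dict Char Int) k =>
        d.insert (PySem.List.pyGetD (t0::t1::t2::t3::rt) k ' ')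
          (d.getD (PySem.List.pyGetD (t0::t1::t2::t3::rt) k ' ') 0 + 1)) PySem.Dict.empty [0,1,2,3])
      = List.foldl (fun (d : PySem.Dict Char Int) x => d.insert x (d.getD x 0 + 1)) PySem.Dict.empty [t0,t1,t2,t3] := by
    simp only [List.foldl, pt0, pt1, pt2, pt3]
  have hget : ∀ c : Char,
      (List.foldl (fun (d : PySem.Dict Char Int) x => d.insert x (d.getD x 0 + 1)) PySem.Dict.empty [t0,t1,t2,t3]).getD c 0
      = ((List.count c [t0,t1,t2,t3] : Nat) : Int) := by
    intro c
    rw [PySem.Dict.getD_foldl_insert_add_one, PySem.Dict.getD_empty, zero_add]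
  unfold thinkb thinkb_alt
  simp only [hr, String.toList_ofList]
  simp only [step, PySem.List.foldl_add]
  simp only [List.map, List.sum, hdict, hget, pa0, pa1, pa2, pa3, pt0, pt1, pt2, pt3]
  simp only [List.count_cons, List.count_nil, beq_iff_eq]
  simp only [List.foldr]
  norm_num
  have hflip : ∀ x y : Char, (if x = y then (1:Int) else 0) = (if y = x then 1 else 0) := by
    intro x y; by_cases h : x = y <;> simp [h, Ne.symm]
  simp only [hflip]
  ring

-- ===== VERDICT (by name: the statement is the Claim_ definition above) =====
theorem thinkb_spec : Claim_equal_thinkb := by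
  intro ans i bb _ hpre
  unfold Spec_thinkb
  obtain ⟨h1, h2⟩ := hpre
  have e1 : String.ofList ans.toList = ans := String.ofList_toList (s := ans)
  have e2 : String.ofList i.toList = i := String.ofList_toList (s := i)
  match hA : ans.toList, hT : i.toList with
  | a0 :: a1 :: a2 :: a3 :: ra, t0 :: t1 :: t2 :: t3 :: rt =>
    rw [← e1, ← e2, hA, hT]
    exact main_eq a0 a1 a2 a3 t0 t1 t2 t3 ra rt bb
  | [], _ => simp [hA] at h1
  | [_], _ => simp [hA] at h1
  | [_,_], _ => simp [hA] at h1
  | [_,_,_], _ => simp [hA] at h1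
  | _ :: _ :: _ :: _ :: _, [] => simp [hT] at h2
  | _ :: _ :: _ :: _ :: _, [_] => simp [hT] at h2
  | _ :: _ :: _ :: _ :: _, [_,_] => simp [hT] at h2
  | _ :: _ :: _ :: _ :: _, [_,_,_] => simp [hT] at h2
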